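-- pv_equiv track=rewrite | github.com/coruzzilab/connectf_server | querytgdb/utils/formatter.py | get_merge_cells
-- ===== SOURCE A (Python) =====
-- from itertools import groupby, islice, zip_longest
-- from operator import itemgetter
-- from typing import Any, Dict, Iterable, List, Tuple, Union
--
-- def get_merge_cells(columns: List[Iterable]) -> List[Dict[str, Any]]:
--     """
--     Get merge cells for Handsontable. Highly customized don't copy paste.
--     :param columns:
--     :return:
--     """
--     columns = list(zip(*columns))
--
--     merged_cells = [{'row': 0, 'col': i, 'colspan': 1, 'rowspan': 6} for i in range(8)]
--
--     for i in range(1, 6):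
--         index = 8
--         for label, group in groupby(columns[8:], key=itemgetter(slice(1, i + 1))):
--             size = sum(1 for _ in group)
--
--             if size > 1:
--                 merged_cells.append({'row': i, 'col': index, 'colspan': size, 'rowspan': 1})
--                 if i == 1:
--                     merged_cells.append({'row': 0, 'col': index, 'colspan': size, 'rowspan': 1})
--
--             index += size
--
--     return merged_cells
-- ===== SOURCE B (Python) =====
-- from typing import Any, Dict, Iterable, List
--
--
-- def get_merge_cells(columns: List[Iterable]) -> List[Dict[str, Any]]:
--     """Single fused forward pass over the transposed tail rows, one run tracker per level."""
--     rows = list(zip(*columns))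
--     tail = rows[8:]
--
--     cells = [{'row': 0, 'col': i, 'colspan': 1, 'rowspan': 6} for i in range(8)]
--     buckets = [[] for _ in range(5)]  # buckets[lvl] holds the merges of row lvl+1
--
--     if tail:
--         starts = [8] * 5
--         prev = tail[0]
--         col = 8
--         for row in tail[1:]:
--             col += 1
--             for lvl in range(5):
--                 if row[1:lvl + 2] != prev[1:lvl + 2]:
--                     size = col - starts[lvl]
--                     if size > 1:
--                         buckets[lvl].append({'row': lvl + 1, 'col': starts[lvl], 'colspan': size, 'rowspan': 1})
--                         if lvl == 0:
--                             buckets[0].append({'row': 0, 'col': starts[lvl], 'colspan': size, 'rowspan': 1})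
--                     starts[lvl] = col
--             prev = row
--         end = 8 + len(tail)
--         for lvl in range(5):
--             size = end - starts[lvl]
--             if size > 1:
--                 buckets[lvl].append({'row': lvl + 1, 'col': starts[lvl], 'colspan': size, 'rowspan': 1})
--                 if lvl == 0:
--                     buckets[0].append({'row': 0, 'col': starts[lvl], 'colspan': size, 'rowspan': 1})
--
--     for b in buckets:
--         cells.extend(b)
--     return cells
-- ===== Notes on version B (the rewrite author's own statement) =====
-- stated objective: alternative
-- what changed: B replaces A's five independent groupby passes over the transposed tail (one per header level) with a single fused forward pass that keeps, per level, a current run start and an output bucket, flushing the open runs at the end and concatenating the eight seed cells with the per-level buckets in level order.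
import Mathlib
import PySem

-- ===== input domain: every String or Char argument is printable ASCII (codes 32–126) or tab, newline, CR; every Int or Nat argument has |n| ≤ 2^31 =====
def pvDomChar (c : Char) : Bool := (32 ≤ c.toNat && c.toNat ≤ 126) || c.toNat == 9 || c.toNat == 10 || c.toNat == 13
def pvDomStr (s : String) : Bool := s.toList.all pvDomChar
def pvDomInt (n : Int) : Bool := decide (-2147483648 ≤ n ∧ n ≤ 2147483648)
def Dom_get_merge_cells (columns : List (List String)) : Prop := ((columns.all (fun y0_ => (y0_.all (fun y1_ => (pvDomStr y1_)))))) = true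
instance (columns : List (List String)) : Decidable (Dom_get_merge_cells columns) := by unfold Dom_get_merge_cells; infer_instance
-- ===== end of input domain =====

-- B replaces A's five independent groupby passes over columns[8:] by ONE fused forward pass that
-- tracks a run start and bucket per level; objective: alternative decomposition (same asymptotic cost).

-- shared helpers (both Pythons build the same dict literal, call zip(*columns) and slice row[1:i+1])

/-- the Handsontable cell dict {'row': r, 'col': c, 'colspan': s, 'rowspan': rs} (insertion order). -/
def pvCell (r c s rs : Int) : List (String × Int) := [("row", r), ("col", c), ("colspan", s), ("rowspan", rs)]

/-- list(zip(*columns)): tuples up to the shortest row; zip() with no iterables is empty. Exact. -/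
def pvTranspose (cols : List (List String)) : List (List String) :=
  match (cols.map List.length).min? with
  | none => []
  | some m => (List.range m).map (fun j => cols.map (fun r => r.getD j ""))

/-- row[1:i+1] for 0 ≤ 1 ≤ i+1: exact as drop-then-take on lists. -/
def pvKey (i : Nat) (row : List String) : List String := (row.drop 1).take i

-- ===== PORT A =====

/-- run lengths of maximal consecutive groups: the sizes `sum(1 for _ in group)` yielded by
    `groupby(xs, key=itemgetter(slice(1, i+1)))`, in order. -/
def pvRunSizesAux (i : Nat) (cur : List String) (n : Nat) : List (List String) → List Nat
  | [] => [n]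
  | r :: rs => if pvKey i r = cur then pvRunSizesAux i cur (n + 1) rs
               else n :: pvRunSizesAux i (pvKey i r) 1 rs

def pvRunSizes (i : Nat) : List (List String) → List Nat
  | [] => []
  | r :: rs => pvRunSizesAux i (pvKey i r) 1 rs

/-- one iteration of A's inner loop body: state (index, merged_cells). -/
def pvStepA (i : Nat) (st : Int × List (List (String × Int))) (size : Nat) :
    Int × List (List (String × Int)) :=
  let merged := if size > 1 then
      st.2 ++ [pvCell i st.1 size 1] ++ (if i = 1 then [pvCell 0 st.1 size 1] else [])
    else st.2
  (st.1 + size, merged)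

def get_merge_cells (columns : List (List String)) : List (List (String × Int)) :=
  let cols := pvTranspose columns
  let seeds := (List.range 8).map (fun i => pvCell 0 i 1 6)
  let tail := cols.drop 8          -- columns[8:]
  -- for i in range(1, 6): index = 8; for each group size: …
  ([1, 2, 3, 4, 5] : List Nat).foldl
    (fun merged i => ((pvRunSizes i tail).foldl (pvStepA i) (8, merged)).2) seeds

-- ===== PORT B =====

/-- per-row update of one level tracker (lvl, run start, bucket): close the run when the key changed. -/
def pvClose (row prev : List String) (col : Int)
    (t : Nat × Int × List (List (String × Int))) : Nat × Int × List (List (String × Int)) :=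
  if pvKey (t.1 + 1) row ≠ pvKey (t.1 + 1) prev then
    let size := col - t.2.1
    let bucket := if size > 1 then
        t.2.2 ++ [pvCell (t.1 + 1) t.2.1 size 1] ++ (if t.1 = 0 then [pvCell 0 t.2.1 size 1] else [])
      else t.2.2
    (t.1, col, bucket)
  else t

/-- end-of-input flush of one tracker: close the still-open run against the final column. -/
def pvFlush (endCol : Int) (t : Nat × Int × List (List (String × Int))) :
    List (List (String × Int)) :=
  let size := endCol - t.2.1
  if size > 1 then
    t.2.2 ++ [pvCell (t.1 + 1) t.2.1 size 1] ++ (if t.1 = 0 then [pvCell 0 t.2.1 size 1] else [])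
  else t.2.2

def get_merge_cells_alt (columns : List (List String)) : List (List (String × Int)) :=
  let rows := pvTranspose columns
  let tail := rows.drop 8
  let cells := (List.range 8).map (fun i => pvCell 0 i 1 6)
  match tail with
  | [] => cells
  | first :: rest =>
    let init : List (Nat × Int × List (List (String × Int))) :=
      (List.range 5).map (fun lvl => (lvl, (8 : Int), []))
    let fin := rest.foldl
      (fun (st : List (Nat × Int × List (List (String × Int))) × List String × Int) row =>
        let col := st.2.2 + 1
        (st.1.map (pvClose row st.2.1 col), row, col))
      (init, first, (8 : Int))
    let endCol : Int := 8 + (tail.length : Int)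
    cells ++ (fin.1.map (pvFlush endCol)).flatten

-- ===== PRECONDITION & SPEC =====
def Spec_get_merge_cells (columns : List (List String)) (out : List (List (String × Int))) : Prop := out = get_merge_cells_alt columns
instance (columns : List (List String)) (out : List (List (String × Int))) : Decidable (Spec_get_merge_cells columns out) := by unfold Spec_get_merge_cells; infer_instance

-- ===== CLAIM (what is proved, stated in full; the proofs are below) =====
def Claim_equal_get_merge_cells : Prop := ∀ (columns : List (List String)), Dom_get_merge_cells columns → Spec_get_merge_cells columns (get_merge_cells columns)

-- ===== LEMMAS AND PROOFS =====

theorem pvStepA_acc (i : Nat) (sizes : List Nat) (idx : Int) (acc : List (List (String × Int))) :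
    sizes.foldl (pvStepA i) (idx, acc)
      = ((sizes.foldl (pvStepA i) (idx, [])).1, acc ++ (sizes.foldl (pvStepA i) (idx, [])).2) := by
  induction sizes generalizing idx acc with
  | nil => simp
  | cons s ss ih =>
    simp only [List.foldl_cons, pvStepA]
    rw [ih, ih (idx + s) (if s > 1 then _ else _)]
    split_ifs <;> simp

def pvOne : List (List String) → (Nat × Int × List (List (String × Int))) → List String → Int →
    Nat × Int × List (List (String × Int))
  | [], t, _, _ => t
  | row :: rs, t, prev, col => pvOne rs (pvClose row prev (col + 1) t) row (col + 1)

theorem pvCore (lvl : Nat) (rest : List (List String)) (prev : List String)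
    (start : Int) (n : Nat) (hn : 1 ≤ n) (bucket : List (List (String × Int))) :
    bucket ++ ((pvRunSizesAux (lvl + 1) (pvKey (lvl + 1) prev) n rest).foldl
        (pvStepA (lvl + 1)) (start, [])).2
      = pvFlush (start + n + (rest.length : Int))
          (pvOne rest (lvl, start, bucket) prev (start + n - 1)) := by
  induction rest generalizing prev start n bucket with
  | nil =>
    simp only [pvRunSizesAux, List.foldl_cons, List.foldl_nil, pvOne, pvFlush, pvStepA,
      List.length_nil, Int.natCast_zero, add_zero]
    rw [show start + (n : Int) - start = (n : Int) by ring]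
    have h3 : ((n : Int) > 1) ↔ (n > 1) := by exact_mod_cast Iff.rfl
    split_ifs with hgt hi hgt2 <;> simp_all
  | cons row rs ih =>
    by_cases hk : pvKey (lvl + 1) row = pvKey (lvl + 1) prev
    · have h := ih row start (n + 1) (by omega) bucket
      rw [hk] at h
      simp only [pvRunSizesAux, if_pos hk, pvOne, List.length_cons]
      rw [show pvClose row prev (start + (n : Int) - 1 + 1) (lvl, start, bucket)
            = (lvl, start, bucket) by simp [pvClose, hk]]
      rw [show start + (n : Int) + ((rs.length + 1 : Nat) : Int)
            = start + ((n + 1 : Nat) : Int) + (rs.length : Int) by push_cast; ring,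
          show start + (n : Int) - 1 + 1 = start + ((n + 1 : Nat) : Int) - 1 by push_cast; ring]
      exact h
    · simp only [pvRunSizesAux, if_neg hk, List.foldl_cons, pvOne, List.length_cons]
      rw [pvStepA_acc]
      have hcl : pvClose row prev (start + (n : Int) - 1 + 1) (lvl, start, bucket)
          = (lvl, start + n,
             if ((n : Int) > 1) then
               bucket ++ [pvCell (lvl + 1) start n 1] ++
                 (if lvl = 0 then [pvCell 0 start n 1] else [])
             else bucket) := by
        simp only [pvClose, ne_eq, hk, not_false_iff, if_pos]
        rw [show start + (n : Int) - 1 + 1 - start = (n : Int) by ring,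
            show start + (n : Int) - 1 + 1 = start + (n : Int) by ring]
      rw [hcl]
      set bucket' := if ((n : Int) > 1) then
          bucket ++ [pvCell (lvl + 1) start n 1] ++
            (if lvl = 0 then [pvCell 0 start n 1] else [])
        else bucket with hb
      have h := ih row (start + n) 1 (by omega) bucket'
      rw [show start + (n : Int) + ((1 : Nat) : Int) + (rs.length : Int)
            = start + (n : Int) + ((rs.length + 1 : Nat) : Int) by push_cast; ring,
          show start + (n : Int) + ((1 : Nat) : Int) - 1 = start + (n : Int) by push_cast; ring] at h
      rw [show start + (n : Int) - 1 + 1 = start + (n : Int) by ring]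
      simp only [pvStepA]
      rw [← h, hb]
      have h3 : ((n : Int) > 1) ↔ (n > 1) := by exact_mod_cast Iff.rfl
      have h4 : (lvl + 1 = 1) ↔ (lvl = 0) := by omega
      simp only [h3, h4]
      split_ifs with hgt <;> simp [List.append_assoc]

theorem pvLevel (lvl : Nat) (first : List String) (rest : List (List String)) :
    ((pvRunSizes (lvl + 1) (first :: rest)).foldl (pvStepA (lvl + 1)) (8, [])).2
      = pvFlush (8 + ((first :: rest).length : Int)) (pvOne rest (lvl, 8, []) first 8) := by
  have h := pvCore lvl rest first 8 1 (by omega) []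
  simp only [List.nil_append] at h
  rw [pvRunSizes, h]
  rw [show (8 : Int) + ((1 : Nat) : Int) + (rest.length : Int)
        = 8 + (((first :: rest).length : Nat) : Int) by simp; ring,
      show (8 : Int) + ((1 : Nat) : Int) - 1 = 8 by simp]

theorem pvFold_map (rest : List (List String)) (ts : List (Nat × Int × List (List (String × Int))))
    (prev : List String) (col : Int) :
    (rest.foldl
      (fun (st : List (Nat × Int × List (List (String × Int))) × List String × Int) row =>
        let c := st.2.2 + 1
        (st.1.map (pvClose row st.2.1 c), row, c))
      (ts, prev, col)).1
      = ts.map (fun t => pvOne rest t prev col) := by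
  induction rest generalizing ts prev col with
  | nil => simp [pvOne]
  | cons row rs ih =>
    simp only [List.foldl_cons]
    rw [ih]
    simp [List.map_map, pvOne, Function.comp]

theorem pv_main (tail : List (List String)) (seeds : List (List (String × Int))) :
    ([1, 2, 3, 4, 5] : List Nat).foldl
        (fun merged i => ((pvRunSizes i tail).foldl (pvStepA i) (8, merged)).2) seeds
      = (match tail with
         | [] => seeds
         | first :: rest =>
           let init : List (Nat × Int × List (List (String × Int))) :=
             (List.range 5).map (fun lvl => (lvl, (8 : Int), []))
           let fin := rest.foldl
             (fun (st : List (Nat × Int × List (List (String × Int))) × List String × Int) row =>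
               let col := st.2.2 + 1
               (st.1.map (pvClose row st.2.1 col), row, col))
             (init, first, (8 : Int))
           seeds ++ (fin.1.map (pvFlush (8 + (tail.length : Int)))).flatten) := by
  match tail with
  | [] => simp [pvRunSizes]
  | first :: rest =>
    simp only
    rw [pvFold_map]
    rw [show List.range 5 = [0, 1, 2, 3, 4] by decide]
    simp only [List.map_cons, List.map_nil, List.flatten]
    rw [← pvLevel 0, ← pvLevel 1, ← pvLevel 2, ← pvLevel 3, ← pvLevel 4]
    simp only [List.foldl_cons, List.foldl_nil]
    have step2 : ∀ (i : Nat) (sizes : List Nat) (idx : Int) (acc : List (List (String × Int))),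
        (sizes.foldl (pvStepA i) (idx, acc)).2 = acc ++ (sizes.foldl (pvStepA i) (idx, [])).2 := by
      intro i sizes idx acc; rw [pvStepA_acc]
    rw [step2 1, step2 2, step2 3, step2 4, step2 5]
    simp [List.append_assoc]

-- ===== VERDICT (by name: the statement is the Claim_ definition above) =====
theorem get_merge_cells_spec : Claim_equal_get_merge_cells := by
  intro columns _
  show get_merge_cells columns = get_merge_cells_alt columns
  unfold get_merge_cells get_merge_cells_alt
  exact pv_main _ _
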